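-- pv_equiv track=rewrite | github.com/guyue0823/CodeNest | src/components/lsps/python_lsp/python_lsp.py | _get_active_parameter
-- ===== SOURCE A (Python) =====
-- def _get_active_parameter(text: str) -> int:
--     open_paren = text.rfind("(")
--     if open_paren == -1:
--         return 0
--
--     param_text = text[open_paren + 1:]
--     count = 0
--     depth = 0
--     for c in param_text:
--         if c == ",":
--             count += 1
--     return count
-- ===== SOURCE B (Python) =====
-- def _get_active_parameter(text: str) -> int:
--     count = 0
--     for c in reversed(text):
--         if c == "(":
--             return count
--         if c == ",":
--             count += 1
--     return 0
-- ===== Notes on version B (the rewrite author's own statement) =====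
-- stated objective: alternative
-- what changed: A does rfind('(') then builds the suffix slice and counts commas in a second forward pass; B is one fused right-to-left pass that counts commas and stops at the first '(' seen from the end, never building a slice.
import Mathlib
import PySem

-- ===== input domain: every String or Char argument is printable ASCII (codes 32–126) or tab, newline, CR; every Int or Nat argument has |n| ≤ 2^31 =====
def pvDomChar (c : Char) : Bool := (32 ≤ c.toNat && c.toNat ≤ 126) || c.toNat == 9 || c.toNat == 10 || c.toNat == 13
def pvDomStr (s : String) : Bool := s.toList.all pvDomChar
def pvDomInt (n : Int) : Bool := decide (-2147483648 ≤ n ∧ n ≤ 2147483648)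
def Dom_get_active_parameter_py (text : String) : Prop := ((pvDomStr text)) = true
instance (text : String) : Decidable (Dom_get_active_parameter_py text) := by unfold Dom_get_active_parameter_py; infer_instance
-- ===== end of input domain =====

-- B replaces A's rfind-then-slice-then-count (two passes plus a suffix copy) by one fused
-- right-to-left pass that counts commas and stops at the first '(' seen from the end.

-- ===== PORT A =====
def get_active_parameter_py (text : String) : Int :=
  let open_paren := PySem.Str.rfind text "("
  if open_paren == -1 then 0
  else
    let param_text := PySem.List.slice text.toList (some (open_paren + 1)) none
    param_text.foldl (fun count c => if c == ',' then count + 1 else count) 0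

-- ===== PORT B =====
def pvAltGo : List Char → Int → Int
  | [], _ => 0
  | c :: rest, count =>
      if c == '(' then count
      else pvAltGo rest (if c == ',' then count + 1 else count)

def get_active_parameter_py_alt (text : String) : Int :=
  pvAltGo text.toList.reverse 0

-- ===== PRECONDITION & SPEC =====
def Spec_get_active_parameter_py (text : String) (out : Int) : Prop := out = get_active_parameter_py_alt text
instance (text : String) (out : Int) : Decidable (Spec_get_active_parameter_py text out) := by unfold Spec_get_active_parameter_py; infer_instance

-- ===== CLAIM (what is proved, stated in full; the proofs are below) =====
def Claim_equal_get_active_parameter_py : Prop := ∀ (text : String), Dom_get_active_parameter_py text → Spec_get_active_parameter_py text (get_active_parameter_py text)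

-- ===== LEMMAS AND PROOFS =====

theorem pv_prefix_single (l : List Char) (c : Char) :
    ([c].isPrefixOf l) = true ↔ l.head? = some c := by
  cases l with
  | nil => simp [List.isPrefixOf]
  | cons x xs =>
    simp only [List.isPrefixOf, List.head?_cons, Option.some.injEq, Bool.and_true, beq_iff_eq]
    exact eq_comm

theorem pv_go_none (cs : List Char) (n : Nat)
    (h : ∀ i, i ≤ n → cs[i]? ≠ some '(') :
    PySem.Chars.rfind.go cs ['('] n = -1 := by
  induction n with
  | zero =>
    unfold PySem.Chars.rfind.go
    have : ¬ (['('].isPrefixOf cs = true) := by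
      rw [pv_prefix_single, List.head?_eq_getElem?]
      exact h 0 (le_refl 0)
    simp [this]
  | succ j ih =>
    unfold PySem.Chars.rfind.go
    have hj1 : ¬ (['('].isPrefixOf (cs.drop (j+1)) = true) := by
      rw [pv_prefix_single, List.head?_drop]
      exact h (j+1) (le_refl _)
    simp only [hj1, if_false]
    exact ih (fun i hi => h i (Nat.le_succ_of_le hi))

theorem pv_go_found (cs : List Char) (p n : Nat)
    (hp : cs[p]? = some '(') (hpn : p ≤ n)
    (h : ∀ i, p < i → i ≤ n → cs[i]? ≠ some '(') :
    PySem.Chars.rfind.go cs ['('] n = (p : Int) := by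
  induction n with
  | zero =>
    have hp0 : p = 0 := Nat.le_zero.mp hpn
    subst hp0
    unfold PySem.Chars.rfind.go
    have : ['('].isPrefixOf cs = true := by
      rw [pv_prefix_single, List.head?_eq_getElem?]; exact hp
    simp [this]
  | succ j ih =>
    unfold PySem.Chars.rfind.go
    by_cases hpre : ['('].isPrefixOf (cs.drop (j+1)) = true
    · have hget : cs[j+1]? = some '(' := by
        rw [pv_prefix_single, List.head?_drop] at hpre; exact hpre
      have hpj : p = j + 1 := by
        by_contra hne
        have hlt : p < j + 1 := lt_of_le_of_ne hpn hne
        exact h (j+1) hlt (le_refl _) hget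
      simp [hpre, hpj]
    · simp only [hpre, if_false]
      have hpj : p ≤ j := by
        have hne : p ≠ j + 1 := by
          intro e
          rw [pv_prefix_single, List.head?_drop] at hpre
          exact hpre (e ▸ hp)
        omega
      exact ih hpj (fun i hi hij => h i hi (Nat.le_succ_of_le hij))

-- last-occurrence split of a list
theorem pv_last_split {c : Char} {cs : List Char} (h : c ∈ cs) :
    ∃ pre suf, cs = pre ++ c :: suf ∧ c ∉ suf := by
  induction cs using List.reverseRecOn with
  | nil => simp at h
  | append_singleton init x ih =>
    by_cases hx : x = c
    · exact ⟨init, [], by simp [hx], by simp⟩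
    · have hm : c ∈ init := by
        rcases List.mem_append.mp h with h1 | h1
        · exact h1
        · simp at h1; exact absurd h1.symm hx
      obtain ⟨p, s, rfl, hs⟩ := ih hm
      refine ⟨p, s ++ [x], by simp, ?_⟩
      intro hc
      rcases List.mem_append.mp hc with h1 | h1
      · exact hs h1
      · have h1' : c = x := by simpa using h1
        exact hx h1'.symm

theorem pv_goB_no_paren (l : List Char) (k : Int) (h : '(' ∉ l) :
    pvAltGo l k = 0 := by
  induction l generalizing k with
  | nil => rfl
  | cons x xs ih =>
    have hx : ¬ (x == '(') = true := by
      simp; rintro rfl; exact h (List.mem_cons_self ..)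
    simp only [pvAltGo, hx, if_false]
    exact ih _ (fun hm => h (List.mem_cons_of_mem _ hm))

theorem pv_goB_paren (l t : List Char) (k : Int) (h : '(' ∉ l) :
    pvAltGo (l ++ '(' :: t) k = k + (l.count ',' : Int) := by
  induction l generalizing k with
  | nil => simp [pvAltGo]
  | cons x xs ih =>
    have hx : ¬ (x == '(') = true := by
      simp; rintro rfl; exact h (List.mem_cons_self ..)
    simp only [List.cons_append, pvAltGo, hx, if_false]
    rw [ih _ (fun hm => h (List.mem_cons_of_mem _ hm))]
    by_cases hc : x = ','
    · simp [hc, List.count_cons]; ring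
    · have : ¬ (x == ',') = true := by simp [hc]
      simp [this, List.count_cons, hc]

theorem pv_rfind_no_paren (cs : List Char) (h : '(' ∉ cs) :
    PySem.Chars.rfind cs ['('] = -1 := by
  unfold PySem.Chars.rfind
  exact pv_go_none cs cs.length (fun i _ hi => h (List.mem_of_getElem? hi))

theorem pv_rfind_split (pre suf : List Char) (h : '(' ∉ suf) :
    PySem.Chars.rfind (pre ++ '(' :: suf) ['('] = (pre.length : Int) := by
  unfold PySem.Chars.rfind
  apply pv_go_found
  · rw [List.getElem?_append_right (le_refl _)]
    simp
  · simp [List.length_append]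
  · intro i hi _ hget
    rw [List.getElem?_append_right (Nat.le_of_lt hi)] at hget
    have h1 : 0 < i - pre.length := by omega
    rcases Nat.exists_eq_add_of_lt h1 with ⟨j, hj⟩
    rw [show i - pre.length = j + 1 by omega] at hget
    simp only [List.getElem?_cons_succ] at hget
    exact h (List.mem_of_getElem? hget)

theorem pv_slice_from_succ (xs : List Char) (n : Nat) :
    PySem.List.slice xs (some ((n : Int) + 1)) none = xs.drop (n + 1) := by
  rw [show ((n : Int) + 1) = ((n + 1 : Nat) : Int) by push_cast; ring,
     PySem.List.slice_from_natCast]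

-- ===== VERDICT (by name: the statement is the Claim_ definition above) =====
theorem get_active_parameter_py_spec : Claim_equal_get_active_parameter_py := by
  intro text _
  unfold Spec_get_active_parameter_py get_active_parameter_py get_active_parameter_py_alt
  rw [PySem.Str.rfind_eq, show ("(" : String).toList = ['('] from rfl]
  by_cases h : '(' ∈ text.toList
  · obtain ⟨pre, suf, hsplit, hsuf⟩ := pv_last_split h
    rw [hsplit, pv_rfind_split pre suf hsuf]
    have hne : (((pre.length : Int)) == (-1 : Int)) = false := by
      simp
    have hdrop : (pre ++ '(' :: suf).drop (pre.length + 1) = suf := by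
      rw [show pre ++ '(' :: suf = (pre ++ ['(']) ++ suf by simp,
         show pre.length + 1 = (pre ++ ['(']).length by simp, List.drop_left]
    have hrev : (pre ++ '(' :: suf).reverse = suf.reverse ++ '(' :: pre.reverse := by simp
    simp only [hne, Bool.false_eq_true, if_false, pv_slice_from_succ, hdrop,
      PySem.List.foldl_beq_add_one, hrev]
    rw [pv_goB_paren _ _ _ (by simpa using hsuf), List.count_reverse]
  · rw [pv_rfind_no_paren _ h]
    simp only [show ((-1 : Int) == (-1 : Int)) = true from rfl, if_true]
    rw [pv_goB_no_paren _ _ (by simpa using h)]
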